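-- pv_equiv track=rewrite | github.com/Arpit7400/myHackerRankSolutions | implementation/Append and Delete.py | appendAndDelete
-- ===== SOURCE A (Python) =====
-- def appendAndDelete(s, t, k):
--     count=0
--     for i in range(min(len(s),len(t))):
--         if s[i]!=t[i]:
--             ss=s[i:]
--             tt=t[i:]
--             count+=len(ss)+len(tt)
--             break
--     if len(s)!=len(t) and count==0:
--         count=max(len(s),len(t))-min(len(s),len(t))
--     if count<=k and len(s)>=len(t) :
--         return "Yes"
--     elif count<=k and set(list(s))==set(list(t)):
--         return "Yes"
--     else:
--         return "No"
-- ===== SOURCE B (Python) =====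
-- def appendAndDelete(s, t, k):
--     # Binary search for the common-prefix length p: s[:m] == t[:m] is monotone in m.
--     lo, hi = 0, min(len(s), len(t))
--     while lo < hi:
--         mid = (lo + hi + 1) // 2
--         if s[:mid] == t[:mid]:
--             lo = mid
--         else:
--             hi = mid - 1
--     count = len(s) + len(t) - 2 * lo
--     return "Yes" if count <= k and (len(s) >= len(t) or set(s) == set(t)) else "No"
-- ===== Notes on version B (the rewrite author's own statement) =====
-- stated objective: alternative
-- what changed: B binary-searches for the common-prefix length via whole-slice comparisons (the monotone predicate s[:m]==t[:m]) and then decides with the closed form len(s)+len(t)-2*p and one combined condition, instead of A's linear break-and-accumulate character scan plus a separate length-difference fixup and an if/elif chain.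
import Mathlib
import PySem

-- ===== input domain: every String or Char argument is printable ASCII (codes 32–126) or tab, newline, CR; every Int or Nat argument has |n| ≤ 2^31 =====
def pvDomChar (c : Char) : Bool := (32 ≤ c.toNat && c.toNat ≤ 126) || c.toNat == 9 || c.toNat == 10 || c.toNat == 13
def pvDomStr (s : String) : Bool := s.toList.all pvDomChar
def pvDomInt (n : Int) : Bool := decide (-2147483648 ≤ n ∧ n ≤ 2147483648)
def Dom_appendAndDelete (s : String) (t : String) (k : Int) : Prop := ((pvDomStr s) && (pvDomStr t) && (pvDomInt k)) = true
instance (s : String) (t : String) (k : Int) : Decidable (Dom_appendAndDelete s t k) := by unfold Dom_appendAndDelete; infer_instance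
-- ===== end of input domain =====

-- B finds the common-prefix length by binary search on the monotone predicate s[:m]==t[:m]
-- and decides with the closed form len(s)+len(t)-2*p in one combined condition, replacing A's
-- linear break-and-accumulate scan, its separate length-difference fixup and its if/elif chain
-- (objective: alternative; same return value).

-- ===== PORT A =====
-- A's 'for i in range(min(len(s),len(t)))' with break: step i compares s[i], t[i]; on the
-- first mismatch count becomes len(s[i:]) + len(t[i:]) (the remaining suffixes' lengths).
def aLoop : List Char → List Char → Int
  | a :: as, b :: bs =>
      if a ≠ b then ((a :: as).length : Int) + ((b :: bs).length : Int)
      else aLoop as bs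
  | _, _ => 0

def appendAndDelete (s : String) (t : String) (k : Int) : String :=
  let sl := s.toList
  let tl := t.toList
  let count0 := aLoop sl tl
  let count : Int :=
    if sl.length ≠ tl.length ∧ count0 = 0 then
      ((max sl.length tl.length : Nat) : Int) - ((min sl.length tl.length : Nat) : Int)
    else count0
  if count ≤ k ∧ tl.length ≤ sl.length then "Yes"
  else if count ≤ k ∧ PySem.Set.equal (PySem.Set.ofList sl) (PySem.Set.ofList tl) = true then "Yes"
  else "No"

-- ===== PORT B =====
-- Source B's 'while lo < hi' binary search; s[:mid] == t[:mid] is List.take mid comparison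
-- (mid ≥ 0, so the slice is exactly 'take').
def bsearchP (sl tl : List Char) (lo hi : Nat) : Nat :=
  if lo < hi then
    let mid := (lo + hi + 1) / 2
    if sl.take mid = tl.take mid then bsearchP sl tl mid hi
    else bsearchP sl tl lo (mid - 1)
  else lo
termination_by hi - lo
decreasing_by all_goals omega

def appendAndDelete_alt (s : String) (t : String) (k : Int) : String :=
  let sl := s.toList
  let tl := t.toList
  let p : Nat := bsearchP sl tl 0 (min sl.length tl.length)
  let count : Int := (sl.length : Int) + (tl.length : Int) - 2 * (p : Int)
  if count ≤ k ∧ (tl.length ≤ sl.length ∨ PySem.Set.equal (PySem.Set.ofList sl) (PySem.Set.ofList tl) = true)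
  then "Yes" else "No"

-- ===== PRECONDITION & SPEC =====
def Spec_appendAndDelete (s : String) (t : String) (k : Int) (out : String) : Prop := out = appendAndDelete_alt s t k
instance (s : String) (t : String) (k : Int) (out : String) : Decidable (Spec_appendAndDelete s t k out) := by unfold Spec_appendAndDelete; infer_instance

-- ===== CLAIM (what is proved, stated in full; the proofs are below) =====
def Claim_equal_appendAndDelete : Prop := ∀ (s : String) (t : String) (k : Int), Dom_appendAndDelete s t k → Spec_appendAndDelete s t k (appendAndDelete s t k)

-- ===== LEMMAS AND PROOFS =====

-- the common-prefix length both sides are about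
def pfx (sl tl : List Char) : Nat := ((sl.zip tl).takeWhile (fun ab => ab.1 == ab.2)).length

theorem pfx_le_min (sl tl : List Char) : pfx sl tl ≤ min sl.length tl.length := by
  have h1 := List.takeWhile_sublist (l := sl.zip tl) (p := fun ab => ab.1 == ab.2)
  have := h1.length_le
  simpa [pfx, List.length_zip] using this

-- slice equality is monotone: s[:i]==t[:i] iff i ≤ common-prefix length (for i within range)
theorem take_eq_iff (i : Nat) : ∀ (sl tl : List Char), i ≤ min sl.length tl.length →
    (sl.take i = tl.take i ↔ i ≤ pfx sl tl) := by
  induction i with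
  | zero => intro sl tl _; simp
  | succ i ih =>
      intro sl tl h
      cases sl with
      | nil => simp at h
      | cons a as =>
        cases tl with
        | nil => simp at h
        | cons b bs =>
          simp only [List.length_cons] at h
          by_cases hab : a = b
          · subst hab
            have := ih as bs (by omega)
            simp [pfx, this]
          · constructor
            · intro he; simp [List.take_succ_cons] at he; exact absurd he.1 hab
            · intro hp
              have : pfx (a :: as) (b :: bs) = 0 := by
                simp [pfx, hab]
              omega

theorem bsearch_eq (sl tl : List Char) :
    ∀ n lo hi, hi - lo ≤ n → lo ≤ pfx sl tl → pfx sl tl ≤ hi →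
      hi ≤ min sl.length tl.length → bsearchP sl tl lo hi = pfx sl tl := by
  intro n
  induction n with
  | zero =>
      intro lo hi h1 h2 h3 h4
      rw [bsearchP]
      rw [if_neg (by omega)]
      omega
  | succ n ih =>
      intro lo hi h1 h2 h3 h4
      rw [bsearchP]
      by_cases hlt : lo < hi
      · rw [if_pos hlt]
        have hmid1 : lo < (lo + hi + 1) / 2 := by omega
        have hmid2 : (lo + hi + 1) / 2 ≤ hi := by omega
        have hiff := take_eq_iff ((lo + hi + 1) / 2) sl tl (by omega)
        by_cases he : sl.take ((lo + hi + 1) / 2) = tl.take ((lo + hi + 1) / 2)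
        · rw [if_pos he]
          exact ih _ _ (by omega) (hiff.mp he) h3 h4
        · rw [if_neg he]
          have : ¬ ((lo + hi + 1) / 2 ≤ pfx sl tl) := fun hp => he (hiff.mpr hp)
          exact ih _ _ (by omega) h2 (by omega) (by omega)
      · rw [if_neg hlt]; omega

-- A's fixed-up count equals the closed form over the common-prefix length.
theorem countA_eq (sl tl : List Char) :
    (if sl.length ≠ tl.length ∧ aLoop sl tl = 0 then
        ((max sl.length tl.length : Nat) : Int) - ((min sl.length tl.length : Nat) : Int)
      else aLoop sl tl)
    = (sl.length : Int) + (tl.length : Int) - 2 * ((pfx sl tl : Nat) : Int) := by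
  induction sl generalizing tl with
  | nil => cases tl <;> simp [aLoop, pfx]
  | cons a as ih =>
      cases tl with
      | nil => simp [aLoop, pfx]
      | cons b bs =>
          by_cases hab : a = b
          · subst hab
            have := ih bs
            rw [show aLoop (a :: as) (a :: bs) = aLoop as bs by simp [aLoop]]
            simp only [pfx, List.zip_cons_cons, List.takeWhile_cons, BEq.rfl, List.length_cons] at this ⊢
            have hiff : (as.length + 1 ≠ bs.length + 1) ↔ (as.length ≠ bs.length) := by omega
            simp only [hiff, if_pos trivial, List.length_cons]
            split_ifs at this ⊢ with h1
            · push_cast [Nat.cast_max, Nat.cast_min] at this ⊢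
              omega
            · push_cast at this ⊢
              omega
          · rw [show aLoop (a :: as) (b :: bs)
                = ((a :: as).length : Int) + ((b :: bs).length : Int) by simp [aLoop, hab]]
            rw [if_neg (by simp; omega)]
            simp [pfx, hab]

-- A's 'if c∧x / elif c∧y / else' chain equals B's single 'if c∧(x∨y)' decision.
theorem ifChain (c x y : Prop) [Decidable c] [Decidable x] [Decidable y] :
    (if c ∧ x then "Yes" else if c ∧ y then "Yes" else "No")
    = (if c ∧ (x ∨ y) then "Yes" else "No") := by
  by_cases hc : c <;> by_cases hx : x <;> by_cases hy : y <;> simp [hc, hx, hy]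

-- ===== VERDICT (by name: the statement is the Claim_ definition above) =====
theorem appendAndDelete_spec : Claim_equal_appendAndDelete := by
  intro s t k _
  show appendAndDelete s t k = appendAndDelete_alt s t k
  unfold appendAndDelete appendAndDelete_alt
  dsimp only
  rw [countA_eq]
  rw [bsearch_eq s.toList t.toList (min s.toList.length t.toList.length) 0
        (min s.toList.length t.toList.length) (by omega) (Nat.zero_le _)
        (pfx_le_min _ _) (le_refl _)]
  exact ifChain _ _ _
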